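-- pv_equiv track=rewrite | github.com/mtreviso/deepbond | deepbond/error_analysis/ss.py | _text_to_labels
-- ===== SOURCE A (Python) =====
-- def _text_to_labels(text):
-- 	labels = []
-- 	for word in text.strip().split():
-- 		if word == '.':
-- 			labels[-1] = 1
-- 		else:
-- 			labels.append(0)
-- 	labels[-1] = 1
-- 	return labels
-- ===== SOURCE B (Python) =====
-- def _text_to_labels(text):
-- 	words = text.strip().split()
-- 	labels = []
-- 	for word, nxt in zip(words, words[1:] + ['.']):
-- 		if word != '.':
-- 			labels.append(1 if nxt == '.' else 0)
-- 	return labels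
-- ===== Notes on version B (the rewrite author's own statement) =====
-- stated objective: simpler
-- what changed: B is a single append-only forward pass that labels each word by looking ahead (zip of words with their successors plus a '.' sentinel), replacing A's retroactive labels[-1]=1 mutations and final override; B never rewrites an emitted label.
-- outside the precondition, e.g. on _text_to_labels('.'): A raises IndexError, B returns []; on _text_to_labels('. a'): A raises IndexError, B returns [1]; on _text_to_labels(''): A raises IndexError, B returns []
import Mathlib
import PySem

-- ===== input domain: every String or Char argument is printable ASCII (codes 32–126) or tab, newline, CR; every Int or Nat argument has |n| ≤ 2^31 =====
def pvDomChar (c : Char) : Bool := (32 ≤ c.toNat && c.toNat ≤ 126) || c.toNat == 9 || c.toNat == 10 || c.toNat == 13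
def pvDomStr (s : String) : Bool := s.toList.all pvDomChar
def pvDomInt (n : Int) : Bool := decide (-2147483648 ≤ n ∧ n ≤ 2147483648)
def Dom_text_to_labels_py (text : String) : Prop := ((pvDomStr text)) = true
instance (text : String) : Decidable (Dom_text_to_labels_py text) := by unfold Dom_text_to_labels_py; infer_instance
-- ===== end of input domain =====

-- B replaces A's retroactive labels[-1]=1 mutations by an append-only forward pass with a
-- lookahead (zip of words with their successors plus a '.' sentinel); objective: simpler.

-- ===== PORT A =====
def text_to_labels_py (text : String) : List Int :=
  let labels := (PySem.Str.split₀ (PySem.Str.strip text)).foldl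
    (fun labels word =>
      if word == "." then labels.dropLast ++ [1]   -- labels[-1] = 1 (IndexError on [] is excluded by Pre_)
      else labels ++ [0]) []
  labels.dropLast ++ [1]                            -- final labels[-1] = 1 (same remark)

-- ===== PORT B =====
def text_to_labels_py_alt (text : String) : List Int :=
  let words := PySem.Str.split₀ (PySem.Str.strip text)
  (words.zip (words.drop 1 ++ ["."])).foldl
    (fun labels p =>
      if p.1 ≠ "." then labels ++ [if p.2 == "." then (1 : Int) else 0] else labels) []

-- ===== PRECONDITION & SPEC =====
-- Pre_ excludes exactly the inputs on which A raises IndexError: a stripped word list that is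
-- empty or starts with '.' (labels[-1] on an empty list).
def Pre_text_to_labels_py (text : String) : Prop :=
  PySem.Str.split₀ (PySem.Str.strip text) ≠ [] ∧
  (PySem.Str.split₀ (PySem.Str.strip text)).head? ≠ some "."
instance (text : String) : Decidable (Pre_text_to_labels_py text) := by unfold Pre_text_to_labels_py; infer_instance
def pvWitness_text_to_labels_py : String := "a b ."

def Spec_text_to_labels_py (text : String) (out : List Int) : Prop := out = text_to_labels_py_alt text
instance (text : String) (out : List Int) : Decidable (Spec_text_to_labels_py text out) := by unfold Spec_text_to_labels_py; infer_instance

-- ===== CLAIM (what is proved, stated in full; the proofs are below) =====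
def Claim_equal_text_to_labels_py : Prop := ∀ (text : String), Dom_text_to_labels_py text → Pre_text_to_labels_py text → Spec_text_to_labels_py text (text_to_labels_py text)

-- ===== LEMMAS AND PROOFS =====

-- Labels of A's loop (no final override): a non-dot word gets 1 iff the next token is '.'.
def hLab : List String → List Int
  | [] => []
  | w :: rest =>
    if w = "." then hLab rest
    else (if rest.head? = some "." then (1 : Int) else 0) :: hLab rest

-- Labels of B: same, but the end of the list counts as '.' (sentinel).
def gLab : List String → List Int
  | [] => []
  | w :: rest =>
    if w = "." then gLab rest
    else (if rest.head?.getD "." = "." then (1 : Int) else 0) :: gLab rest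

lemma hLab_nil_iff (ws : List String) : hLab ws = [] ↔ ∀ w ∈ ws, w = "." := by
  induction ws with
  | nil => simp [hLab]
  | cons w rest ih =>
    by_cases hw : w = "." <;> simp [hLab, hw, ih]

lemma gLab_nil_of_all (ws : List String) (h : ∀ w ∈ ws, w = ".") : gLab ws = [] := by
  induction ws with
  | nil => rfl
  | cons w rest ih =>
    have hw : w = "." := h w (by simp)
    simp only [gLab, hw]
    exact ih (fun x hx => h x (by simp [hx]))

lemma foldA_eq (ws : List String) (l : List Int) (a : Int) :
    ws.foldl (fun labels word =>
      if word == "." then labels.dropLast ++ [1] else labels ++ [0]) (l ++ [a])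
    = l ++ [if ws.head? = some "." then 1 else a] ++ hLab ws := by
  induction ws generalizing l a with
  | nil => simp [hLab]
  | cons w rest ih =>
    by_cases hw : w = "."
    · subst hw
      simp only [List.foldl_cons, beq_self_eq_true, if_pos, List.dropLast_concat]
      rw [ih l 1]
      simp [hLab]
    · have hb : (w == ".") = false := by simp [hw]
      simp only [List.foldl_cons, hb, Bool.false_eq_true, if_false]
      rw [List.append_assoc l [a] [0], ← List.append_assoc l [a] [0]]
      rw [ih (l ++ [a]) 0]
      simp [hLab, hw, List.append_assoc]

lemma foldB_eq (ws : List String) (acc : List Int) :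
    (ws.zip (ws.drop 1 ++ ["."])).foldl
      (fun labels p =>
        if p.1 ≠ "." then labels ++ [if p.2 == "." then (1 : Int) else 0] else labels) acc
    = acc ++ gLab ws := by
  induction ws generalizing acc with
  | nil => simp [gLab]
  | cons w rest ih =>
    have hz : (w :: rest).zip ((w :: rest).drop 1 ++ ["."])
        = (w, rest.head?.getD ".") :: rest.zip (rest.drop 1 ++ ["."]) := by
      cases rest <;> simp
    rw [hz]
    by_cases hw : w = "."
    · simp only [List.foldl_cons, hw, ne_eq, not_true_eq_false, if_false]
      rw [ih acc]
      simp [gLab]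
    · simp only [List.foldl_cons, ne_eq, hw, not_false_eq_true, if_true]
      rw [ih]
      by_cases hn : rest.head?.getD "." = "."
      · simp [gLab, hw, hn, List.append_assoc]
      · simp [gLab, hw, hn, List.append_assoc]

lemma foldA_eq0 (ws : List String) :
    ws.foldl (fun labels word =>
      if word == "." then labels.dropLast ++ [1] else labels ++ [0]) [0]
    = (if ws.head? = some "." then (1 : Int) else 0) :: hLab ws := by
  have := foldA_eq ws [] 0
  simpa using this

lemma drop_h_eq_g (ws : List String) (h : hLab ws ≠ []) :
    (hLab ws).dropLast ++ [1] = gLab ws := by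
  induction ws with
  | nil => exact absurd rfl h
  | cons w rest ih =>
    by_cases hw : w = "."
    · subst hw
      simp only [hLab] at h ⊢
      simp only [gLab]
      exact ih h
    · simp only [hLab, hw, if_false] at h ⊢
      simp only [gLab, if_neg hw]
      by_cases hr : hLab rest = []
      · have hall : ∀ x ∈ rest, x = "." := (hLab_nil_iff rest).1 hr
        have hg : gLab rest = [] := gLab_nil_of_all rest hall
        have hcond : rest.head?.getD "." = "." := by
          cases rest with
          | nil => rfl
          | cons r rs => exact hall r (by simp)
        rw [hr, hg, hcond]
        simp
      · have hne : rest ≠ [] := by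
          intro hx; rw [hx] at hr; exact hr rfl
        obtain ⟨r, rs, hrr⟩ := List.exists_cons_of_ne_nil hne
        subst hrr
        have hcond : (r :: rs).head?.getD "." = "." ↔ ((r :: rs).head? = some ".") := by simp
        rw [List.dropLast_cons_of_ne_nil hr, List.cons_append, ih hr]
        by_cases hc : r = "." <;> simp [gLab, hc]

-- ===== VERDICT (by name: the statement is the Claim_ definition above) =====
theorem text_to_labels_py_spec : Claim_equal_text_to_labels_py := by
  intro text _ hpre
  obtain ⟨hne, hhd⟩ := hpre
  unfold Spec_text_to_labels_py text_to_labels_py text_to_labels_py_alt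
  obtain ⟨w, rest, hws⟩ := List.exists_cons_of_ne_nil hne
  rw [hws] at hhd ⊢
  have hw : w ≠ "." := by simpa using hhd
  have hb : (w == ".") = false := by simp [hw]
  simp only [List.foldl_cons, hb, Bool.false_eq_true, if_false, List.nil_append]
  rw [foldA_eq0, foldB_eq, List.nil_append]
  have hh : hLab (w :: rest) = (if rest.head? = some "." then (1 : Int) else 0) :: hLab rest := by
    simp [hLab, hw]
  have hne2 : hLab (w :: rest) ≠ [] := by rw [hh]; simp
  rw [← hh]
  exact drop_h_eq_g _ hne2
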